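-- pv_equiv track=rewrite | github.com/KristapsRjabovs/abian-category | build_categories.py | coverage_diagnostic
-- ===== SOURCE A (Python) =====
-- from collections import defaultdict
--
-- def coverage_diagnostic(rows):
--     """For every leaf with mappings, list which suppliers cover it."""
--     leaf_suppliers = defaultdict(set)
--     for supplier, _, code, _ in rows:
--         if code:
--             leaf_suppliers[code].add(supplier)
--     only_also = sorted([c for c, s in leaf_suppliers.items() if s == {"also_data"}])
--     only_elko = sorted([c for c, s in leaf_suppliers.items() if s == {"elko"}])
--     both = sorted([c for c, s in leaf_suppliers.items() if len(s) >= 2])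
--     return only_also, only_elko, both
-- ===== SOURCE B (Python) =====
-- def coverage_diagnostic(rows):
--     """For every leaf with mappings, list which suppliers cover it."""
--     # Sort the distinct (code, supplier) pairs once; runs of equal codes are
--     # then contiguous, so one grouped scan classifies each leaf and the three
--     # result lists come out already in sorted order (no per-list sort).
--     pairs = sorted({(code, supplier) for supplier, _, code, _ in rows if code})
--     only_also, only_elko, both = [], [], []
--     while pairs:
--         c, s = pairs[0]
--         run = 1
--         while run < len(pairs) and pairs[run][0] == c:
--             run += 1
--         if run >= 2:
--             both.append(c)
--         elif s == "also_data":
--             only_also.append(c)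
--         elif s == "elko":
--             only_elko.append(c)
--         pairs = pairs[run:]
--     return only_also, only_elko, both
-- ===== Notes on version B (the rewrite author's own statement) =====
-- stated objective: alternative
-- what changed: Instead of grouping suppliers per code in a dict of sets and filtering it three times, B sorts the distinct (code, supplier) pairs once and classifies each contiguous run of equal codes in a single grouped scan, so the three lists come out already sorted with no dict, no sets-per-code and no per-list sort.
import Mathlib
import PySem

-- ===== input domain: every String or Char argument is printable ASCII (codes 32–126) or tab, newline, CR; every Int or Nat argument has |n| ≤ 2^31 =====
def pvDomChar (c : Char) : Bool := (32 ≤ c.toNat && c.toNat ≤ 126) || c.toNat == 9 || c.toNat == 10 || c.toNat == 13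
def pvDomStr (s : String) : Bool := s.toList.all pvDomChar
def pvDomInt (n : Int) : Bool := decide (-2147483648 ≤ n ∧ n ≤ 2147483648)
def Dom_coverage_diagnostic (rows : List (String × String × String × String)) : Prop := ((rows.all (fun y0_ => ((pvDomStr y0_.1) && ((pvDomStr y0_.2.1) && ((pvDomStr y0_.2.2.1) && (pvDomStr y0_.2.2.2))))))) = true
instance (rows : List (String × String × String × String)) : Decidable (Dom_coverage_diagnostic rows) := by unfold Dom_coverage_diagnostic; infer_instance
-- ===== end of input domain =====

-- B replaces A's dict-of-supplier-sets plus three filtered passes by sorting the distinct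
-- (code, supplier) pairs once and classifying each contiguous run of equal codes in a single
-- grouped scan (alternative algorithm; the three lists come out already sorted).


-- ===== PORT A =====
-- for supplier, _, code, _ in rows: if code: leaf_suppliers[code].add(supplier)
-- (defaultdict(set): read-with-default then in-place .add = Dict.modify with default empty set)
-- then three sorted filter-comprehensions over leaf_suppliers.items()
def coverage_diagnostic (rows : List (String × String × String × String)) : List String × List String × List String :=
  let leaf_suppliers : PySem.Dict String (PySem.Set String) :=
    rows.foldl (fun d r => if r.2.2.1 ≠ "" then d.modify r.2.2.1 [] (fun s => PySem.Set.add s r.1) else d) PySem.Dict.empty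
  let only_also := PySem.List.sorted ((leaf_suppliers.items.filter (fun p => PySem.Set.equal p.2 ["also_data"])).map (·.1)) (fun c => c) false
  let only_elko := PySem.List.sorted ((leaf_suppliers.items.filter (fun p => PySem.Set.equal p.2 ["elko"])).map (·.1)) (fun c => c) false
  let both := PySem.List.sorted ((leaf_suppliers.items.filter (fun p => decide (2 ≤ PySem.Set.len p.2))).map (·.1)) (fun c => c) false
  (only_also, only_elko, both)

-- ===== PORT B =====
-- the set comprehension {(code, supplier) for supplier, _, code, _ in rows if code}
def pvPairs (rows : List (String × String × String × String)) : List (String × String) :=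
  (rows.filter (fun r => r.2.2.1 != "")).map (fun r => (r.2.2.1, r.1))

-- the inner while 'run = 1; while run < len(pairs) and pairs[run][0] == c: run += 1' counts the
-- leading elements of the tail whose code equals c (structural recursion over the tail; run = result + 1)
def pvRunLen (c : String) : List (String × String) → Nat
  | [] => 0
  | q :: t => if q.1 == c then pvRunLen c t + 1 else 0

-- the outer 'while pairs:' loop: classify the head run, then continue on pairs[run:]
def pvScanLoop : List (String × String) → List String → List String → List String → List String × List String × List String
  | [], oa, oe, ob => (oa, oe, ob)
  | p :: t, oa, oe, ob =>
    let run := pvRunLen p.1 t + 1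
    if 2 ≤ run then pvScanLoop ((p :: t).drop run) oa oe (ob ++ [p.1])
    else if p.2 == "also_data" then pvScanLoop ((p :: t).drop run) (oa ++ [p.1]) oe ob
    else if p.2 == "elko" then pvScanLoop ((p :: t).drop run) oa (oe ++ [p.1]) ob
    else pvScanLoop ((p :: t).drop run) oa oe ob
termination_by pairs _ _ _ => pairs.length
decreasing_by all_goals simp [List.drop_succ_cons, List.length_drop]

-- pairs = sorted({(code, supplier) …}); then the grouped scan
def coverage_diagnostic_alt (rows : List (String × String × String × String)) : List String × List String × List String :=
  let pairs := PySem.List.sorted2 (PySem.Set.ofList (pvPairs rows)) Prod.fst Prod.snd false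
  pvScanLoop pairs [] [] []

-- ===== PRECONDITION & SPEC =====
def Spec_coverage_diagnostic (rows : List (String × String × String × String)) (out : List String × List String × List String) : Prop := out = coverage_diagnostic_alt rows
instance (rows : List (String × String × String × String)) (out : List String × List String × List String) : Decidable (Spec_coverage_diagnostic rows out) := by unfold Spec_coverage_diagnostic; infer_instance

-- ===== CLAIM (what is proved, stated in full; the proofs are below) =====
def Claim_equal_coverage_diagnostic : Prop := ∀ (rows : List (String × String × String × String)), Dom_coverage_diagnostic rows → Spec_coverage_diagnostic rows (coverage_diagnostic rows)

-- ===== LEMMAS AND PROOFS =====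

-- the sorted distinct codes of a pair list
def pvC (X : List (String × String)) : List String :=
  PySem.List.sorted (PySem.Set.ofList (X.map (·.1))) (fun c => c) false
-- the group of a code: all pairs of X carrying it
def pvG (X : List (String × String)) (c : String) : List (String × String) :=
  X.filter (fun p => p.1 == c)
-- the sole supplier of a code, when its group is a singleton
def pvSole (X : List (String × String)) (c : String) : Option String :=
  match pvG X c with
  | [q] => some q.2
  | _ => none
def pvPA (X : List (String × String)) (c : String) : Bool := pvSole X c == some "also_data"
def pvPE (X : List (String × String)) (c : String) : Bool := pvSole X c == some "elko"
def pvPB (X : List (String × String)) (c : String) : Bool := decide (2 ≤ (pvG X c).length)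

theorem pvFoldPairs (rows : List (String × String × String × String)) (d : PySem.Dict String (PySem.Set String)) :
    rows.foldl (fun d r => if r.2.2.1 ≠ "" then d.modify r.2.2.1 [] (fun s => PySem.Set.add s r.1) else d) d
    = (pvPairs rows).foldl (fun d p => d.modify p.1 [] (fun s => PySem.Set.add s p.2)) d := by
  unfold pvPairs
  rw [List.foldl_map, PySem.List.foldl_ite_eq_foldl_filter (fun r : String × String × String × String => r.2.2.1 ≠ "")]
  congr 1
  exact List.filter_congr (fun r _ => by cases hb : r.2.2.1 == "" <;> simp_all [bne])

theorem pvGetD (l : List (String × String)) (d : PySem.Dict String (PySem.Set String)) (c : String) :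
    ((l.foldl (fun d p => d.modify p.1 [] (fun s => PySem.Set.add s p.2)) d).getD c [])
    = PySem.Set.update (d.getD c []) ((l.filter (fun p => p.1 == c)).map (·.2)) := by
  induction l generalizing d with
  | nil => simp [PySem.Set.update]
  | cons p t ih =>
    simp only [List.foldl_cons, ih, PySem.Dict.getD_modify]
    by_cases h : p.1 = c
    · subst h; simp [PySem.Set.update_cons]
    · simp [h, Ne.symm h]

theorem pvKeys (l : List (String × String)) (d : PySem.Dict String (PySem.Set String)) :
    ((l.foldl (fun d p => d.modify p.1 [] (fun s => PySem.Set.add s p.2)) d).keys)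
    = PySem.Set.update d.keys (l.map (·.1)) := by
  induction l generalizing d with
  | nil => simp [PySem.Set.update]
  | cons p t ih =>
    simp only [List.foldl_cons, ih, List.map_cons, PySem.Set.update_cons]
    congr 1
    rw [PySem.Dict.keys_modify, PySem.Set.add_eq_ite]
    by_cases h : p.1 ∈ d.keys
    · rw [PySem.Dict.keys_insert_of_contains _ _ ((PySem.Dict.contains_iff_mem_keys d p.1).2 h)]
      simp [h]
    · rw [PySem.Dict.keys_insert_of_not_contains _ _ (by
        cases hc : d.contains p.1
        · rfl
        · exact absurd ((PySem.Dict.contains_iff_mem_keys d p.1).1 hc) h)]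
      simp [h]

theorem pvItemsFilter (l : List (String × PySem.Set String)) (Q : PySem.Set String → Bool)
    (h : (l.map Prod.fst).Nodup) :
    ((l.filter (fun p => Q p.2)).map Prod.fst)
    = (l.map Prod.fst).filter (fun c => Q ((PySem.Dict.mk l).getD c [])) := by
  induction l with
  | nil => simp
  | cons a t ih =>
    simp only [List.map_cons, List.nodup_cons] at h
    have hgD : ∀ c, c ≠ a.1 → (PySem.Dict.mk (a :: t)).getD c [] = (PySem.Dict.mk t).getD c [] := by
      intro c hc
      simp [PySem.Dict.getD, PySem.Dict.get?, beq_iff_eq, hc.symm]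
    have hself : (PySem.Dict.mk (a :: t)).getD a.1 [] = a.2 := by
      simp [PySem.Dict.getD, PySem.Dict.get?]
    have htail : (t.map Prod.fst).filter (fun c => Q ((PySem.Dict.mk (a :: t)).getD c []))
        = (t.map Prod.fst).filter (fun c => Q ((PySem.Dict.mk t).getD c [])) := by
      refine List.filter_congr ?_
      intro c hc
      rw [hgD c (fun he => h.1 (he ▸ hc))]
    rw [List.filter_cons, List.map_cons, List.filter_cons, htail, ← ih h.2, hself]
    by_cases hq : Q a.2 <;> simp [hq]

theorem pvRunLen_take (c : String) (t : List (String × String)) :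
    ∀ q ∈ t.take (pvRunLen c t), q.1 = c := by
  induction t with
  | nil => simp [pvRunLen]
  | cons q t ih =>
    by_cases h : q.1 = c
    · simp only [pvRunLen, h, beq_self_eq_true, if_true, List.take_succ_cons]
      intro r hr
      rw [List.mem_cons] at hr
      rcases hr with rfl | hr
      · exact h
      · exact ih r hr
    · simp [pvRunLen, h]

theorem pvRunLen_drop_head (c : String) (t : List (String × String)) (q : String × String)
    (h : (t.drop (pvRunLen c t)).head? = some q) : q.1 ≠ c := by
  induction t with
  | nil => simp [pvRunLen] at h
  | cons r t ih =>
    by_cases hr : r.1 = c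
    · simp only [pvRunLen, hr, beq_self_eq_true, if_true, List.drop_succ_cons] at h
      exact ih h
    · simp only [pvRunLen, beq_iff_eq, hr, if_false, List.drop_zero, List.head?_cons,
        Option.some_inj] at h
      exact h ▸ hr

def pvLexB (a b : String × String) : Bool :=
  decide (a.1 < b.1) || (!decide (b.1 < a.1) && decide (a.2 < b.2))

theorem pvInsertBy_mono (x : String × String) (ys : List (String × String))
    (h : ys.Pairwise (fun a b => a.1 ≤ b.1)) :
    (PySem.List.insertBy pvLexB x ys).Pairwise (fun a b => a.1 ≤ b.1) := by
  induction ys with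
  | nil => simp [PySem.List.insertBy]
  | cons y t ih =>
    rw [List.pairwise_cons] at h
    by_cases hb : pvLexB x y = true
    · have hxy : x.1 ≤ y.1 := by
        simp only [pvLexB, Bool.or_eq_true, decide_eq_true_eq, Bool.and_eq_true,
          Bool.not_eq_true', decide_eq_false_iff_not] at hb
        rcases hb with hlt | ⟨hnlt, _⟩
        · exact le_of_lt hlt
        · exact le_of_not_gt hnlt
      have : PySem.List.insertBy pvLexB x (y :: t) = x :: y :: t := by
        simp [PySem.List.insertBy, hb]
      rw [this]
      exact List.pairwise_cons.2 ⟨by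
        intro z hz
        rw [List.mem_cons] at hz
        rcases hz with rfl | hz
        · exact hxy
        · exact le_trans hxy (h.1 z hz), List.pairwise_cons.2 h⟩
    · have hyx : y.1 ≤ x.1 := by
        simp only [pvLexB, Bool.or_eq_true, decide_eq_true_eq, Bool.and_eq_true,
          Bool.not_eq_true', decide_eq_false_iff_not] at hb
        push Not at hb
        exact le_of_not_gt hb.1
      have : PySem.List.insertBy pvLexB x (y :: t) = y :: PySem.List.insertBy pvLexB x t := by
        simp [PySem.List.insertBy, hb]
      rw [this]
      refine List.pairwise_cons.2 ⟨?_, ih h.2⟩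
      intro z hz
      rw [PySem.List.mem_insertBy] at hz
      rcases hz with rfl | hz
      · exact hyx
      · exact h.1 z hz

theorem pvSorted2_mono (xs : List (String × String)) :
    (PySem.List.sorted2 xs Prod.fst Prod.snd false).Pairwise (fun a b => a.1 ≤ b.1) := by
  have hgen : ∀ (l : List (String × String)) (acc : List (String × String)),
      acc.Pairwise (fun a b => a.1 ≤ b.1) →
      (l.foldl (fun acc x => PySem.List.insertBy pvLexB x acc) acc).Pairwise (fun a b => a.1 ≤ b.1) := by
    intro l
    induction l with
    | nil => intro acc h; simpa using h
    | cons x t ih => intro acc h; exact ih _ (pvInsertBy_mono x acc h)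
  have : PySem.List.sorted2 xs Prod.fst Prod.snd false
      = xs.foldl (fun acc x => PySem.List.insertBy pvLexB x acc) [] := rfl
  rw [this]
  exact hgen xs [] (by simp)

theorem pvRest_gt (p : String × String) (t : List (String × String))
    (hm : (p :: t).Pairwise (fun a b => a.1 ≤ b.1)) :
    ∀ q ∈ t.drop (pvRunLen p.1 t), p.1 < q.1 := by
  intro q hq
  rw [List.pairwise_cons] at hm
  rcases hR : t.drop (pvRunLen p.1 t) with _ | ⟨r, R'⟩
  · rw [hR] at hq; simp at hq
  · have hr1 : r.1 ≠ p.1 := pvRunLen_drop_head p.1 t r (by rw [hR]; rfl)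
    have hrt : r ∈ t := by
      have : r ∈ t.drop (pvRunLen p.1 t) := by rw [hR]; exact List.mem_cons_self
      exact List.mem_of_mem_drop this
    have hpr : p.1 < r.1 := lt_of_le_of_ne (hm.1 r hrt) (Ne.symm hr1)
    rw [hR] at hq
    rw [List.mem_cons] at hq
    rcases hq with rfl | hq
    · exact hpr
    · have hdp : (t.drop (pvRunLen p.1 t)).Pairwise (fun a b => a.1 ≤ b.1) := hm.2.drop
      rw [hR, List.pairwise_cons] at hdp
      exact lt_of_lt_of_le hpr (hdp.1 q hq)

theorem pvG_head (p : String × String) (t : List (String × String))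
    (hm : (p :: t).Pairwise (fun a b => a.1 ≤ b.1)) :
    pvG (p :: t) p.1 = p :: t.take (pvRunLen p.1 t) := by
  have hsplit : t = t.take (pvRunLen p.1 t) ++ t.drop (pvRunLen p.1 t) := (List.take_append_drop _ _).symm
  unfold pvG
  rw [List.filter_cons]
  simp only [beq_self_eq_true, if_pos]
  congr 1
  conv_lhs => rw [hsplit]
  rw [List.filter_append]
  rw [List.filter_eq_self.2 (fun q hq => by simp [pvRunLen_take p.1 t q hq]),
      List.filter_eq_nil_iff.2 (fun q hq => by
        simp only [beq_iff_eq]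
        exact ne_of_gt (pvRest_gt p t hm q hq)), List.append_nil]

theorem pvG_rest (p : String × String) (t : List (String × String)) (c : String)
    (_hm : (p :: t).Pairwise (fun a b => a.1 ≤ b.1)) (hc : c ≠ p.1) :
    pvG (p :: t) c = pvG (t.drop (pvRunLen p.1 t)) c := by
  have hsplit : t = t.take (pvRunLen p.1 t) ++ t.drop (pvRunLen p.1 t) := (List.take_append_drop _ _).symm
  unfold pvG
  rw [List.filter_cons]
  simp only [beq_iff_eq, Ne.symm hc, ite_false]
  conv_lhs => rw [hsplit]
  rw [List.filter_append, List.filter_eq_nil_iff.2 (fun q hq => by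
    simp only [beq_iff_eq]
    rw [pvRunLen_take p.1 t q hq]
    exact Ne.symm hc), List.nil_append]

theorem pvC_step (p : String × String) (t : List (String × String))
    (hm : (p :: t).Pairwise (fun a b => a.1 ≤ b.1)) :
    pvC (p :: t) = p.1 :: pvC (t.drop (pvRunLen p.1 t)) := by
  unfold pvC
  set R := t.drop (pvRunLen p.1 t) with hR
  have hgt : ∀ q ∈ R, p.1 < q.1 := pvRest_gt p t hm
  have hmemL : ∀ x, x ∈ (p :: t).map (·.1) ↔ x = p.1 ∨ x ∈ R.map (·.1) := by
    intro x
    constructor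
    · intro hx
      rw [List.map_cons, List.mem_cons] at hx
      rcases hx with rfl | hx
      · exact Or.inl rfl
      · rw [List.mem_map] at hx
        obtain ⟨q, hq, rfl⟩ := hx
        have hq' : q ∈ t.take (pvRunLen p.1 t) ++ R := by
          rw [hR, List.take_append_drop]; exact hq
        rcases List.mem_append.1 hq' with h1 | h2
        · exact Or.inl (pvRunLen_take p.1 t q h1)
        · exact Or.inr (List.mem_map.2 ⟨q, h2, rfl⟩)
    · intro hx
      rcases hx with rfl | hx
      · simp
      · rw [List.mem_map] at hx
        obtain ⟨q, hq, rfl⟩ := hx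
        exact List.mem_map.2 ⟨q, List.mem_cons_of_mem _ (List.mem_of_mem_drop hq), rfl⟩
  have hmemCR : ∀ x, x ∈ PySem.List.sorted (PySem.Set.ofList (R.map (·.1))) (fun c => c) false →
      p.1 < x := by
    intro x hx
    rw [PySem.List.mem_sorted, PySem.Set.mem_ofList, List.mem_map] at hx
    obtain ⟨q, hq, rfl⟩ := hx
    exact hgt q hq
  have hndCR : (PySem.List.sorted (PySem.Set.ofList (R.map (·.1))) (fun c => c) false).Nodup :=
    (PySem.List.sorted_perm _ _ _).symm.nodup (PySem.Set.nodup_ofList _)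
  have hnd : (p.1 :: PySem.List.sorted (PySem.Set.ofList (R.map (·.1))) (fun c => c) false).Nodup := by
    rw [List.nodup_cons]
    exact ⟨fun hmem => lt_irrefl p.1 (hmemCR _ hmem), hndCR⟩
  refine PySem.List.sorted_eq_of_perm_of_pairwise_lt _ _ _ ?_ ?_
  · refine (List.perm_ext_iff_of_nodup hnd (PySem.Set.nodup_ofList _)).2 ?_
    intro x
    rw [List.mem_cons, PySem.Set.mem_ofList, hmemL x, PySem.List.mem_sorted, PySem.Set.mem_ofList]
  · rw [List.pairwise_cons]
    exact ⟨fun y hy => hmemCR y hy, PySem.List.sorted_ofList_pairwise_lt _⟩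

theorem pvRunLen_le (c : String) (t : List (String × String)) : pvRunLen c t ≤ t.length := by
  induction t with
  | nil => simp [pvRunLen]
  | cons q t ih =>
    by_cases h : q.1 = c <;> simp [pvRunLen, h, ih]

theorem pvScan_eq (n : Nat) : ∀ (L : List (String × String)), L.length ≤ n →
    L.Pairwise (fun a b => a.1 ≤ b.1) → ∀ oa oe ob : List String,
    pvScanLoop L oa oe ob
    = (oa ++ (pvC L).filter (pvPA L), oe ++ (pvC L).filter (pvPE L), ob ++ (pvC L).filter (pvPB L)) := by
  induction n with
  | zero =>
    intro L hn _ oa oe ob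
    have hL : L = [] := List.eq_nil_of_length_eq_zero (Nat.le_zero.1 hn)
    subst hL
    simp [pvScanLoop, pvC, PySem.Set.ofList, PySem.List.sorted]
  | succ n ih =>
    intro L hn hm oa oe ob
    match L with
    | [] => simp [pvScanLoop, pvC, PySem.Set.ofList, PySem.List.sorted]
    | p :: t =>
      have hmt : t.Pairwise (fun a b : String × String => a.1 ≤ b.1) := (List.pairwise_cons.1 hm).2
      have hmR : (t.drop (pvRunLen p.1 t)).Pairwise (fun a b : String × String => a.1 ≤ b.1) := hmt.drop
      have hlenR : (t.drop (pvRunLen p.1 t)).length ≤ n := by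
        simp only [List.length_cons] at hn
        have := List.length_drop (l := t) (i := pvRunLen p.1 t)
        omega
      have hCs := pvC_step p t hm
      have hGh := pvG_head p t hm
      -- predicates on codes of the rest agree between L and the rest
      have htrans : ∀ f : List (String × String) → String → Bool,
          (f = pvPA ∨ f = pvPE ∨ f = pvPB) →
          (pvC (t.drop (pvRunLen p.1 t))).filter (f (p :: t))
          = (pvC (t.drop (pvRunLen p.1 t))).filter (f (t.drop (pvRunLen p.1 t))) := by
        intro f hf
        refine List.filter_congr ?_
        intro c hc
        have hcmem : c ∈ (t.drop (pvRunLen p.1 t)).map (·.1) := by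
          have := (PySem.List.mem_sorted _ _ _ c).1 hc
          exact (PySem.Set.mem_ofList _ _).1 this
        obtain ⟨q, hq, rfl⟩ := List.mem_map.1 hcmem
        have hne : q.1 ≠ p.1 := ne_of_gt (pvRest_gt p t hm q hq)
        have hGr := pvG_rest p t q.1 hm hne
        rcases hf with rfl | rfl | rfl <;> simp [pvPA, pvPE, pvPB, pvSole, hGr]
      have hIH := ih (t.drop (pvRunLen p.1 t)) hlenR hmR
      -- one unfolding of the loop
      have hstep : ∀ oa' oe' ob' : List String,
          pvScanLoop (t.drop (pvRunLen p.1 t)) oa' oe' ob'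
          = (oa' ++ (pvC (t.drop (pvRunLen p.1 t))).filter (pvPA (t.drop (pvRunLen p.1 t))),
             oe' ++ (pvC (t.drop (pvRunLen p.1 t))).filter (pvPE (t.drop (pvRunLen p.1 t))),
             ob' ++ (pvC (t.drop (pvRunLen p.1 t))).filter (pvPB (t.drop (pvRunLen p.1 t)))) :=
        fun oa' oe' ob' => hIH oa' oe' ob'
      rw [pvScanLoop]
      simp only [List.drop_succ_cons]
      rcases hk : pvRunLen p.1 t with _ | m
      · -- run = 1: a singleton group, classified by its sole supplier p.2
        rw [hk] at hstep htrans hCs hGh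
        have hG1 : pvG (p :: t) p.1 = [p] := by rw [hGh]; simp
        have hSole : pvSole (p :: t) p.1 = some p.2 := by rw [pvSole, hG1]
        have hPB : pvPB (p :: t) p.1 = false := by simp [pvPB, hG1]
        rw [if_neg (by omega : ¬ (2:Nat) ≤ 0 + 1), hCs]
        by_cases hA : p.2 = "also_data"
        · rw [if_pos (by simp [hA]), hstep]
          simp only [List.filter_cons]
          rw [htrans pvPA (Or.inl rfl), htrans pvPE (Or.inr (Or.inl rfl)),
              htrans pvPB (Or.inr (Or.inr rfl)),
              show pvPA (p :: t) p.1 = true by simp [pvPA, hSole, hA],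
              show pvPE (p :: t) p.1 = false by simp [pvPE, hSole, hA], hPB]
          simp [List.append_assoc]
        · by_cases hE : p.2 = "elko"
          · rw [if_neg (by simp [hA]), if_pos (by simp [hE]), hstep]
            simp only [List.filter_cons]
            rw [htrans pvPA (Or.inl rfl), htrans pvPE (Or.inr (Or.inl rfl)),
                htrans pvPB (Or.inr (Or.inr rfl)),
                show pvPA (p :: t) p.1 = false by simp [pvPA, hSole, hA],
                show pvPE (p :: t) p.1 = true by simp [pvPE, hSole, hE], hPB]
            simp [List.append_assoc]
          · rw [if_neg (by simp [hA]), if_neg (by simp [hE]), hstep]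
            simp only [List.filter_cons]
            rw [htrans pvPA (Or.inl rfl), htrans pvPE (Or.inr (Or.inl rfl)),
                htrans pvPB (Or.inr (Or.inr rfl)),
                show pvPA (p :: t) p.1 = false by simp [pvPA, hSole, hA],
                show pvPE (p :: t) p.1 = false by simp [pvPE, hSole, hE], hPB]
            simp
      · -- run ≥ 2: the code has at least two distinct suppliers
        rw [hk] at hstep htrans hCs hGh
        have hle := pvRunLen_le p.1 t
        rw [hk] at hle
        have hlen : (t.take (m + 1)).length = m + 1 := List.length_take_of_le hle
        rcases htk : t.take (m + 1) with _ | ⟨q, r⟩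
        · rw [htk] at hlen; simp at hlen
        · have hSole : pvSole (p :: t) p.1 = none := by
            unfold pvSole; rw [hGh, htk]
          have hPB : pvPB (p :: t) p.1 = true := by
            simp only [pvPB, hGh, htk]
            simp
          rw [if_pos (by omega : 2 ≤ m + 1 + 1), hstep, hCs]
          simp only [List.filter_cons]
          rw [htrans pvPA (Or.inl rfl), htrans pvPE (Or.inr (Or.inl rfl)),
              htrans pvPB (Or.inr (Or.inr rfl)),
              show pvPA (p :: t) p.1 = false by simp [pvPA, hSole],
              show pvPE (p :: t) p.1 = false by simp [pvPE, hSole], hPB]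
          simp [List.append_assoc]

theorem pvEqualSingleton (a b : String) : PySem.Set.equal [a] [b] = (a == b) := by
  by_cases h : a = b
  · subst h
    simp [(PySem.Set.equal_iff [a] [a]).2 (fun x => Iff.rfl)]
  · have : PySem.Set.equal [a] [b] = false := by
      cases he : PySem.Set.equal [a] [b]
      · rfl
      · have := ((PySem.Set.equal_iff [a] [b]).1 he a).1 (by simp)
        simp at this
        exact absurd this h
    simp [this, h]

-- the supplier-set of a code, as A builds it, matches B's group of that code in the sorted pairs

theorem pvBridge (L P : List (String × String)) (hnd : L.Nodup) (hLP : ∀ x, x ∈ L ↔ x ∈ P)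
    (c : String) (hc : ∃ q ∈ L, q.1 = c) :
    (PySem.Set.equal (PySem.Set.ofList ((P.filter (fun p => p.1 == c)).map (·.2))) ["also_data"] = pvPA L c)
    ∧ (PySem.Set.equal (PySem.Set.ofList ((P.filter (fun p => p.1 == c)).map (·.2))) ["elko"] = pvPE L c)
    ∧ (decide (2 ≤ PySem.Set.len (PySem.Set.ofList ((P.filter (fun p => p.1 == c)).map (·.2)))) = pvPB L c) := by
  set S : PySem.Set String := PySem.Set.ofList ((P.filter (fun p => p.1 == c)).map (·.2)) with hS
  have hmemS : ∀ s, s ∈ S ↔ (c, s) ∈ P := by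
    intro s
    rw [hS, PySem.Set.mem_ofList, List.mem_map]
    constructor
    · rintro ⟨q, hq, rfl⟩
      obtain ⟨hqP, hq1⟩ := List.mem_filter.1 hq
      have : q.1 = c := by simpa using hq1
      exact this ▸ hqP
    · intro h
      exact ⟨(c, s), List.mem_filter.2 ⟨h, by simp⟩, rfl⟩
  have hmemG : ∀ s, s ∈ (pvG L c).map (·.2) ↔ (c, s) ∈ L := by
    intro s
    rw [List.mem_map]
    constructor
    · rintro ⟨q, hq, rfl⟩
      obtain ⟨hqL, hq1⟩ := List.mem_filter.1 hq
      have : q.1 = c := by simpa using hq1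
      exact this ▸ hqL
    · intro h
      exact ⟨(c, s), List.mem_filter.2 ⟨h, by simp⟩, rfl⟩
  have hndG : (pvG L c).Nodup := hnd.filter _
  have hfst : ∀ q ∈ pvG L c, q.1 = c := by
    intro q hq
    have := (List.mem_filter.1 hq).2
    simpa using this
  have hndGm : ((pvG L c).map (·.2)).Nodup := by
    refine List.Nodup.map_on ?_ hndG
    intro x hx y hy hxy
    exact Prod.ext (by rw [hfst x hx, hfst y hy]) hxy
  have hperm : ((pvG L c).map (·.2)).Perm S := by
    refine (List.perm_ext_iff_of_nodup hndGm (PySem.Set.nodup_ofList _)).2 ?_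
    intro s
    rw [hmemG, hmemS, hLP]
  have hlen : (pvG L c).length = S.length := by
    have := hperm.length_eq
    simpa using this
  have hlenInt : (decide (2 ≤ PySem.Set.len S) = pvPB L c) := by
    have : PySem.Set.len S = (S.length : Int) := rfl
    rw [pvPB, this, ← hlen]
    simp
  refine ⟨?_, ?_, hlenInt⟩ <;>
  · rcases hgb : pvG L c with _ | ⟨q, rest⟩
    · obtain ⟨q, hq, hq1⟩ := hc
      have : q ∈ pvG L c := List.mem_filter.2 ⟨hq, by simp [hq1]⟩
      rw [hgb] at this
      simp at this
    · rcases rest with _ | ⟨q', rest'⟩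
      · -- singleton group
        have hSval : S = [q.2] := by
          have h1 : ((pvG L c).map (·.2)) = [q.2] := by rw [hgb]; rfl
          rw [h1] at hperm
          exact List.perm_singleton.1 hperm.symm
        have hsole : pvSole L c = some q.2 := by unfold pvSole; rw [hgb]
        rw [hSval, pvEqualSingleton]
        try simp [pvPA, pvPE, hsole]
      · -- two or more suppliers: never equal to a singleton set
        have hsole : pvSole L c = none := by unfold pvSole; rw [hgb]
        have hlen2 : 2 ≤ S.length := by rw [← hlen, hgb]; simp
        have hne : ∀ b : String, PySem.Set.equal S [b] = false := by
          intro b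
          cases he : PySem.Set.equal S [b]
          · rfl
          · exfalso
            have hpermb : S.Perm [b] :=
              (List.perm_ext_iff_of_nodup (PySem.Set.nodup_ofList _) (by simp)).2
                ((PySem.Set.equal_iff S [b]).1 he)
            have := hpermb.length_eq
            simp at this
            omega
        rw [hne]
        simp [pvPA, pvPE, hsole]

theorem pv_main (rows : List (String × String × String × String)) :
    coverage_diagnostic rows = coverage_diagnostic_alt rows := by
  unfold coverage_diagnostic coverage_diagnostic_alt
  simp only []
  set P : List (String × String) := pvPairs rows with hP
  set L : List (String × String) := PySem.List.sorted2 (PySem.Set.ofList P) Prod.fst Prod.snd false with hL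
  set D : PySem.Dict String (PySem.Set String) :=
    rows.foldl (fun d r => if r.2.2.1 ≠ "" then d.modify r.2.2.1 [] (fun s => PySem.Set.add s r.1) else d) PySem.Dict.empty with hD
  have hDP : D = P.foldl (fun d p => d.modify p.1 [] (fun s => PySem.Set.add s p.2)) PySem.Dict.empty :=
    pvFoldPairs rows PySem.Dict.empty
  have hkeys : D.keys = PySem.Set.ofList (P.map (·.1)) := by
    rw [hDP, pvKeys]
    rw [PySem.Dict.keys_empty, PySem.Set.update_nil_left]
  have hgetD : ∀ c, D.getD c [] = PySem.Set.ofList ((P.filter (fun p => p.1 == c)).map (·.2)) := by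
    intro c
    rw [hDP, pvGetD, PySem.Dict.getD_empty, PySem.Set.update_nil_left]
  have hkeysnd : (D.items.map Prod.fst).Nodup := by
    have : D.items.map Prod.fst = D.keys := rfl
    rw [this, hkeys]
    exact PySem.Set.nodup_ofList _
  have hLperm : L.Perm (PySem.Set.ofList P) := PySem.List.sorted2_perm _ _ _ _
  have hLnd : L.Nodup := hLperm.symm.nodup (PySem.Set.nodup_ofList _)
  have hLP : ∀ x, x ∈ L ↔ x ∈ P := fun x => hLperm.mem_iff.trans (PySem.Set.mem_ofList _ _)
  have hcodes : (PySem.Set.ofList (P.map (·.1))).Perm (PySem.Set.ofList (L.map (·.1))) := by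
    refine (List.perm_ext_iff_of_nodup (PySem.Set.nodup_ofList _) (PySem.Set.nodup_ofList _)).2 ?_
    intro x
    rw [PySem.Set.mem_ofList, PySem.Set.mem_ofList]
    constructor
    · intro hx
      obtain ⟨q, hq, rfl⟩ := List.mem_map.1 hx
      exact List.mem_map.2 ⟨q, (hLP q).2 hq, rfl⟩
    · intro hx
      obtain ⟨q, hq, rfl⟩ := List.mem_map.1 hx
      exact List.mem_map.2 ⟨q, (hLP q).1 hq, rfl⟩
  have hC0 : PySem.List.sorted (PySem.Set.ofList (P.map (·.1))) (fun c => c) false = pvC L := by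
    unfold pvC
    exact PySem.List.sorted_eq_sorted_of_perm _ _ _ (fun a b h => h) hcodes
  have hCperm : (pvC L).Perm (PySem.Set.ofList (P.map (·.1))) := by
    rw [← hC0]
    exact PySem.List.sorted_perm _ _ _
  have hsorted_filter : ∀ q : String → Bool,
      PySem.List.sorted ((PySem.Set.ofList (P.map (·.1))).filter q) (fun c => c) false
      = (pvC L).filter q := by
    intro q
    refine PySem.List.sorted_eq_of_perm_of_pairwise_lt _ _ _ (List.Perm.filter q hCperm) ?_
    refine List.Pairwise.filter q ?_
    rw [← hC0]
    exact PySem.List.sorted_ofList_pairwise_lt _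
  have hmemC : ∀ c ∈ pvC L, ∃ q ∈ L, q.1 = c := by
    intro c hc
    have : c ∈ PySem.Set.ofList (L.map (·.1)) := by
      unfold pvC at hc
      exact (PySem.List.mem_sorted _ _ _ c).1 hc
    rw [PySem.Set.mem_ofList] at this
    obtain ⟨q, hq, rfl⟩ := List.mem_map.1 this
    exact ⟨q, hq, rfl⟩
  -- the three A-side components
  have hcomp : ∀ Q : PySem.Set String → Bool,
      PySem.List.sorted ((D.items.filter (fun p => Q p.2)).map (·.1)) (fun c => c) false
      = (pvC L).filter (fun c => Q (PySem.Set.ofList ((P.filter (fun p => p.1 == c)).map (·.2)))) := by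
    intro Q
    have h1 : ((D.items.filter (fun p => Q p.2)).map (·.1))
        = (D.items.map Prod.fst).filter (fun c => Q (D.getD c [])) := pvItemsFilter D.items Q hkeysnd
    have h2 : D.items.map Prod.fst = PySem.Set.ofList (P.map (·.1)) := hkeys
    have h3 : (fun c => Q (D.getD c []))
        = (fun c => Q (PySem.Set.ofList ((P.filter (fun p => p.1 == c)).map (·.2)))) :=
      funext fun c => congrArg Q (hgetD c)
    rw [h1, h2, h3, hsorted_filter]
  -- B side
  have hB : pvScanLoop L [] [] []
      = ((pvC L).filter (pvPA L), (pvC L).filter (pvPE L), (pvC L).filter (pvPB L)) := by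
    rw [pvScan_eq L.length L le_rfl (pvSorted2_mono _)]
    simp
  rw [hB, hcomp (fun v => PySem.Set.equal v ["also_data"]),
      hcomp (fun v => PySem.Set.equal v ["elko"]),
      hcomp (fun v => decide (2 ≤ PySem.Set.len v))]
  refine Prod.ext ?_ (Prod.ext ?_ ?_) <;> simp only []
  · exact List.filter_congr (fun c hc => (pvBridge L P hLnd hLP c (hmemC c hc)).1)
  · exact List.filter_congr (fun c hc => (pvBridge L P hLnd hLP c (hmemC c hc)).2.1)
  · exact List.filter_congr (fun c hc => (pvBridge L P hLnd hLP c (hmemC c hc)).2.2)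

-- ===== VERDICT (by name: the statement is the Claim_ definition above) =====
theorem coverage_diagnostic_spec : Claim_equal_coverage_diagnostic := by
  intro rows _
  unfold Spec_coverage_diagnostic
  exact pv_main rows
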